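-- pv_equiv track=rewrite | github.com/Starkiller13/big_data_homeworks | big_data_hw1/G33HW1.py | map5
-- ===== SOURCE A (Python) =====
-- def map5(data):
--     pairs_dict={}
--     for p in data[1]:
--         prod, nr = p[0], p[1]
--         if prod not in pairs_dict.keys():
--             pairs_dict[prod] = nr
--         else:
--             if nr > pairs_dict[prod]:
--                 pairs_dict[prod] = nr
--     return [(key, pairs_dict[key]) for key in pairs_dict.keys()]
-- ===== SOURCE B (Python) =====
-- def map5(data):
--     groups = {}
--     for prod, nr in data[1]:
--         groups.setdefault(prod, []).append(nr)
--     return [(k, max(v)) for k, v in groups.items()]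
-- ===== Notes on version B (the rewrite author's own statement) =====
-- stated objective: alternative
-- what changed: Instead of maintaining a running maximum per key with a compare-and-update branch inside the loop, B first groups all quantities into per-product lists in one pass and then computes max(v) for each group in a second pass over the dict items.
import Mathlib
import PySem

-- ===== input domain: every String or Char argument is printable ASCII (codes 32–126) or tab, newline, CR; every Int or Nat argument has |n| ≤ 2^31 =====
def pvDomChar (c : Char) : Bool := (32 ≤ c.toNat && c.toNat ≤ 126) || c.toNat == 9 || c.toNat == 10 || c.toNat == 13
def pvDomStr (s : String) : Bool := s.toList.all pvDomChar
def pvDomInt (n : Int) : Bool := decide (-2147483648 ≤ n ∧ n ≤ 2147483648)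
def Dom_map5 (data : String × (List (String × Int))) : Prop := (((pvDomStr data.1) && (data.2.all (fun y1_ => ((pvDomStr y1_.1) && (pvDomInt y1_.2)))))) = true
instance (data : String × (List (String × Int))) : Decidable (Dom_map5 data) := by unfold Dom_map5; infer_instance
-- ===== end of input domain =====

-- B groups all quantities into per-product lists in one pass, then takes max per group
-- in a second pass over the dict items; A keeps a running max inside the single loop.


-- ===== PORT A =====
-- pairs_dict[prod] / pairs_dict[key] are only read when the key is present, so getD _ 0 is exact.
def map5 (data : String × (List (String × Int))) : List (String × Int) :=
  let pairsDict : PySem.Dict String Int :=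
    data.2.foldl (fun d p =>
      if d.contains p.1 = false then d.insert p.1 p.2
      else if p.2 > d.getD p.1 0 then d.insert p.1 p.2
      else d) PySem.Dict.empty
  pairsDict.keys.map (fun key => (key, pairsDict.getD key 0))

-- ===== PORT B =====
-- groups.setdefault(prod, []).append(nr)  =  groups[prod] = groups.get(prod, []) + [nr]  = Dict.modify;
-- every group list is nonempty, so max(v) = (max? v id).getD 0 never takes the default.
def map5_alt (data : String × (List (String × Int))) : List (String × Int) :=
  let groups : PySem.Dict String (List Int) :=
    data.2.foldl (fun d p => d.modify p.1 [] (fun v => v ++ [p.2])) PySem.Dict.empty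
  groups.items.map (fun kv => (kv.1, (PySem.List.max? kv.2 id).getD 0))

-- ===== PRECONDITION & SPEC =====
def Spec_map5 (data : String × (List (String × Int))) (out : List (String × Int)) : Prop := out = map5_alt data
instance (data : String × (List (String × Int))) (out : List (String × Int)) : Decidable (Spec_map5 data out) := by unfold Spec_map5; infer_instance

-- ===== CLAIM (what is proved, stated in full; the proofs are below) =====
def Claim_equal_map5 : Prop := ∀ (data : String × (List (String × Int))), Dom_map5 data → Spec_map5 data (map5 data)

-- ===== LEMMAS AND PROOFS =====

-- A's loop step, named for the lemmas below (definitionally the lambda in map5).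
def stepA (d : PySem.Dict String Int) (p : String × Int) : PySem.Dict String Int :=
  if d.contains p.1 = false then d.insert p.1 p.2
  else if p.2 > d.getD p.1 0 then d.insert p.1 p.2
  else d

-- Keys of A's loop: each pair adds its key iff fresh, i.e. Set.add.
lemma stepA_keys (d : PySem.Dict String Int) (p : String × Int) :
    (stepA d p).keys = PySem.Set.add d.keys p.1 := by
  have hck : PySem.Set.contains d.keys p.1 = d.contains p.1 := by
    simp [PySem.Set.contains, PySem.Dict.contains_eq_decide_mem_keys]
  unfold stepA PySem.Set.add
  rw [hck]
  by_cases h : d.contains p.1 = false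
  · rw [if_pos h, h, if_neg (by simp)]
    exact PySem.Dict.keys_insert_of_not_contains d p.2 h
  · have h' : d.contains p.1 = true := by simpa using h
    rw [if_neg h, h', if_pos rfl]
    split_ifs with h2
    · exact PySem.Dict.keys_insert_of_contains d p.2 h'
    · rfl

lemma foldA_keys (l : List (String × Int)) (d : PySem.Dict String Int) :
    (l.foldl stepA d).keys = PySem.Set.update d.keys (l.map (·.1)) := by
  induction l generalizing d with
  | nil => simp [PySem.Set.update]
  | cons p l ih => simp [PySem.Set.update, List.foldl_cons, ih, stepA_keys]

-- The running-max step of max? on Int (with key = id).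
def F (acc : Option Int) (x : Int) : Option Int :=
  match acc with
  | none => some x
  | some m => if m < x then some x else some m

lemma max?_eq_foldF (g : List Int) : PySem.List.max? g id = g.foldl F none := by
  unfold PySem.List.max?
  congr 1
  funext acc x
  cases acc <;> simp [F]

-- A's value at k is the running max over the quantities filed under k.
lemma foldA_get? (l : List (String × Int)) (d : PySem.Dict String Int) (k : String) :
    (l.foldl stepA d).get? k =
      ((l.filter (fun p => p.1 == k)).map (·.2)).foldl F (d.get? k) := by
  induction l generalizing d with
  | nil => simp
  | cons p l ih =>
    rw [List.foldl_cons, ih]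
    by_cases hk : p.1 = k
    · subst hk
      by_cases hc : d.contains p.1 = false
      · have hn : d.get? p.1 = none := (PySem.Dict.get?_eq_none_iff_contains d p.1).2 hc
        simp [stepA, hc, hn, F]
      · have h' : d.contains p.1 = true := by simpa using hc
        obtain ⟨m, hm⟩ : ∃ m, d.get? p.1 = some m := by
          have := PySem.Dict.contains_eq_isSome_get? d p.1
          rw [h'] at this
          exact Option.isSome_iff_exists.1 this.symm
        have hgd : d.getD p.1 0 = m := by simp [PySem.Dict.getD_eq_get?_getD, hm]
        by_cases h2 : p.2 > d.getD p.1 0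
        · have hlt : m < p.2 := by rw [hgd] at h2; exact h2
          simp [stepA, hc, h2, hm, F, hlt]
        · have hnlt : ¬ m < p.2 := by rw [hgd] at h2; exact h2
          simp [stepA, hc, h2, hm, F, hnlt]
    · have hbeq : (p.1 == k) = false := by simpa using hk
      have hget : (stepA d p).get? k = d.get? k := by
        unfold stepA
        split_ifs <;> simp [PySem.Dict.get?_insert, Ne.symm hk]
      simp [hbeq, hget]

-- B's dict: what each program outputs at key k, as a function of the group list.
lemma getD_eq_max (l : List (String × Int)) (k : String) :
    (l.foldl stepA PySem.Dict.empty).getD k 0 =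
      (PySem.List.max? ((l.foldl (fun d p => d.modify p.1 []
        (fun v => v ++ [p.2])) PySem.Dict.empty).getD k []) id).getD 0 := by
  rw [PySem.Dict.getD_foldl_modify_append l PySem.Dict.empty k]
  rw [PySem.Dict.getD_eq_get?_getD, foldA_get?, max?_eq_foldF]
  simp

-- ===== VERDICT (by name: the statement is the Claim_ definition above) =====
theorem map5_spec : Claim_equal_map5 := by
  intro data _
  unfold Spec_map5
  set l := data.2 with hl
  set dA : PySem.Dict String Int := l.foldl stepA PySem.Dict.empty with hdA
  set dB : PySem.Dict String (List Int) :=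
    l.foldl (fun d p => d.modify p.1 [] (fun v => v ++ [p.2])) PySem.Dict.empty with hdB
  show dA.keys.map (fun key => (key, dA.getD key 0))
      = dB.items.map (fun kv => (kv.1, (PySem.List.max? kv.2 id).getD 0))
  have hnodup : dB.keys.Nodup := by
    rw [hdB]
    exact PySem.Dict.nodup_keys_foldl_modify_key l Prod.fst []
      (fun _ x v => v ++ [x.2]) PySem.Dict.empty PySem.Dict.nodup_keys_empty
  have hkeysB : dB.keys = PySem.Set.update ([] : List String) (l.map (·.1)) := by
    rw [hdB]
    have := PySem.Dict.keys_foldl_modify_key l Prod.fst []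
      (fun _ x v => v ++ [x.2]) (PySem.Dict.empty : PySem.Dict String (List Int))
    simpa [PySem.Dict.keys_empty] using this
  have hkeysA : dA.keys = PySem.Set.update ([] : List String) (l.map (·.1)) := by
    rw [hdA, foldA_keys]; simp [PySem.Dict.keys_empty]
  -- rewrite B's items-map as a map over its keys
  have hitems : dB.items.map (fun kv => (kv.1, (PySem.List.max? kv.2 id).getD 0))
      = dB.keys.map (fun k => (k, (PySem.List.max? (dB.getD k []) id).getD 0)) := by
    show _ = (dB.items.map (fun x => x.1)).map _
    rw [List.map_map]
    apply List.map_congr_left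
    intro kv hkv
    have : dB.getD kv.1 [] = kv.2 := by
      have := PySem.Dict.getD_of_mem_items dB (k := kv.1) (v := kv.2)
        (by simpa using hkv) hnodup []
      simpa using this
    simp [this]
  rw [hitems, hkeysA, hkeysB]
  apply List.map_congr_left
  intro k _
  rw [hdA, getD_eq_max l k, hdB]
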